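-- pv_equiv track=rewrite | github.com/mayur2111/MROI | 03_create_regression_automation.py | merge_common
-- ===== SOURCE A (Python) =====
-- from collections import Counter, defaultdict
--
-- def merge_common(lists):
--     """Merge function to  merge all sublist having common elements.
--
--     Args:
--         lists ([type]): [description]
--     """
--     neigh = defaultdict(set)
--     visited = set()
--     for each in lists:
--         for item in each:
--             neigh[item].update(each)
--     def comp(node, neigh = neigh, visited = visited, vis = visited.add):
--         nodes = set([node])
--         next_node = nodes.pop
--         while nodes:
--             node = next_node()
--             vis(node)
--             nodes |= neigh[node] - visited
--             yield node
--     for node in neigh: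
--         if node not in visited:
--             yield sorted(comp(node))
-- ===== SOURCE B (Python) =====
-- def merge_common(lists):
--     """Merge all sublists having common elements, by direct fixpoint saturation
--     of each component over the raw sublists (no adjacency map, no BFS worklist)."""
--     visited = set()
--     for each in lists:
--         for k in each:
--             if k in visited:
--                 continue
--             comp = {k}
--             changed = True
--             while changed:
--                 changed = False
--                 for l in lists:
--                     if comp.intersection(l) and not comp.issuperset(l):
--                         comp.update(l)
--                         changed = True
--             visited |= comp
--             yield sorted(comp)
-- ===== Notes on version B (the rewrite author's own statement) =====
-- stated objective: faster
-- what changed: Drops A's precomputed clique-neighbour map (defaultdict of sets, built with O(sum |l|^2) set insertions) and its generator-based BFS worklist; each component is instead grown by fixpoint saturation passes directly over the raw sublists.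
import Mathlib
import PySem

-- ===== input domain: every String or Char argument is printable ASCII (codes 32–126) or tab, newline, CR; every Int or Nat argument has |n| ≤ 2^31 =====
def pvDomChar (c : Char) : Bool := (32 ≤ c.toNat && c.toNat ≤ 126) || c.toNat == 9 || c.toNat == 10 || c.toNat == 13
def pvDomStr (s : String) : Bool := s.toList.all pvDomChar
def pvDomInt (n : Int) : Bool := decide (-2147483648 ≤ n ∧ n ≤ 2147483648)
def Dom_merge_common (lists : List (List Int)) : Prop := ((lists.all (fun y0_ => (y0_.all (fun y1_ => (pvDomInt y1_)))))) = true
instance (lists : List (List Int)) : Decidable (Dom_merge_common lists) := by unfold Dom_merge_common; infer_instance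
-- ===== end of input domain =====

-- B differs from A only in how each component is computed (fixpoint saturation over the raw
-- sublists instead of a clique-neighbour map plus a BFS worklist); the equivalence is about the
-- returned (fully materialised) list of sorted groups, both generators being consumed in full.

-- ===== PORT A =====
-- neigh = defaultdict(set); for each in lists: for item in each: neigh[item].update(each)
def pvNeigh (lists : List (List Int)) : PySem.Dict Int (PySem.Set Int) :=
  lists.foldl
    (fun d each =>
      each.foldl (fun d item => d.modify item PySem.Set.empty (fun s => PySem.Set.update s each)) d)
    PySem.Dict.empty

-- comp(node): worklist loop 'while nodes: node = nodes.pop(); vis(node); nodes |= neigh[node] - visited; yield node'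
-- (Python pops an arbitrary set element; we pop the first — the caller only uses sorted(comp(...))
-- and the final visited set, neither of which depends on the pop order).  Fuel bounds the number of
-- iterations; 'lists.flatten.length + 1' is proved sufficient below.
def pvCompLoop (neigh : PySem.Dict Int (PySem.Set Int)) :
    Nat → PySem.Set Int → PySem.Set Int → List Int → (List Int × PySem.Set Int)
  | 0, _, visited, acc => (acc, visited)
  | _ + 1, [], visited, acc => (acc, visited)
  | fuel + 1, node :: rest, visited, acc =>
    let visited' := PySem.Set.add visited node
    let nodes' := PySem.Set.union rest (PySem.Set.diff (neigh.getD node PySem.Set.empty) visited')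
    pvCompLoop neigh fuel nodes' visited' (acc ++ [node])

-- for node in neigh: if node not in visited: yield sorted(comp(node))
def merge_common (lists : List (List Int)) : List (List Int) :=
  let neigh := pvNeigh lists
  let fuel := lists.flatten.length + 1
  ((pvNeigh lists).keys.foldl
    (fun (st : List (List Int) × PySem.Set Int) node =>
      if PySem.Set.contains st.2 node then st
      else
        let r := pvCompLoop neigh fuel (PySem.Set.ofList [node]) st.2 []
        (st.1 ++ [PySem.List.sorted r.1 (fun x => x) false], r.2))
    ([], PySem.Set.empty)).1

-- ===== PORT B =====
-- one pass: for l in lists: if comp & l and not comp >= l: comp |= l; changed = True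
def pvPass (lists : List (List Int)) (comp : PySem.Set Int) : PySem.Set Int × Bool :=
  lists.foldl
    (fun (st : PySem.Set Int × Bool) l =>
      if PySem.Set.inter st.1 l ≠ [] ∧ PySem.Set.issuperset st.1 l = false then
        (PySem.Set.update st.1 l, true)
      else st)
    (comp, false)

-- while changed: changed = False; <one pass>   (fuel: proved sufficient below)
def pvSaturate (lists : List (List Int)) : Nat → PySem.Set Int → PySem.Set Int
  | 0, comp => comp
  | fuel + 1, comp =>
    let st := pvPass lists comp
    if st.2 then pvSaturate lists fuel st.1 else st.1

def merge_common_alt (lists : List (List Int)) : List (List Int) :=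
  let fuel := lists.flatten.length + 1
  (lists.foldl
    (fun (st : List (List Int) × PySem.Set Int) each =>
      each.foldl
        (fun (st : List (List Int) × PySem.Set Int) k =>
          if PySem.Set.contains st.2 k then st
          else
            let comp := pvSaturate lists fuel (PySem.Set.ofList [k])
            (st.1 ++ [PySem.List.sorted comp (fun x => x) false], PySem.Set.union st.2 comp))
        st)
    ([], PySem.Set.empty)).1

-- ===== PRECONDITION & SPEC =====
def Spec_merge_common (lists : List (List Int)) (out : List (List Int)) : Prop := out = merge_common_alt lists
instance (lists : List (List Int)) (out : List (List Int)) : Decidable (Spec_merge_common lists out) := by unfold Spec_merge_common; infer_instance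

-- ===== CLAIM (what is proved, stated in full; the proofs are below) =====
def Claim_equal_merge_common : Prop := ∀ (lists : List (List Int)), Dom_merge_common lists → Spec_merge_common lists (merge_common lists)

-- ===== LEMMAS AND PROOFS =====

-- the connectivity relation generated by the sublists: x and y share a sublist
def pvEdge (lists : List (List Int)) (x y : Int) : Prop := ∃ l, l ∈ lists ∧ x ∈ l ∧ y ∈ l
def pvConn (lists : List (List Int)) : Int → Int → Prop := Relation.ReflTransGen (pvEdge lists)

theorem pvEdge_symm (lists : List (List Int)) : Symmetric (pvEdge lists) := by
  rintro x y ⟨l, hl, hx, hy⟩; exact ⟨l, hl, hy, hx⟩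

theorem pvConn_symm (lists : List (List Int)) {x y : Int} (h : pvConn lists x y) :
    pvConn lists y x := Relation.ReflTransGen.symmetric (pvEdge_symm lists) h

theorem pvConn_tail (lists : List (List Int)) {x y z : Int}
    (h : pvConn lists x y) (e : pvEdge lists y z) : pvConn lists x z :=
  Relation.ReflTransGen.tail h e

theorem pvEdge_mem_flatten {lists : List (List Int)} {x y : Int}
    (h : pvEdge lists x y) : y ∈ lists.flatten := by
  obtain ⟨l, hl, _, hy⟩ := h
  exact List.mem_flatten.mpr ⟨l, hl, hy⟩

-- a set closed under edges is closed under connectivity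
theorem pvClosed_conn {lists : List (List Int)} {v : List Int}
    (hc : ∀ x ∈ v, ∀ y, pvEdge lists x y → y ∈ v) :
    ∀ x ∈ v, ∀ y, pvConn lists x y → y ∈ v := by
  intro x hx y h
  induction h with
  | refl => exact hx
  | tail _ e ih => exact hc _ ih _ e

theorem pvNodup_subset_length {l D : List Int} (hn : l.Nodup) (hs : ∀ x ∈ l, x ∈ D) :
    l.length ≤ D.length :=
  (List.subperm_of_subset hn (fun x hx => hs x hx)).length_le

-- ---------- the neighbour map of port A ----------

theorem pvNeigh_inner_getD (each items : List Int) (d : PySem.Dict Int (PySem.Set Int))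
    (x y : Int) :
    y ∈ (items.foldl (fun d item => d.modify item PySem.Set.empty
          (fun s => PySem.Set.update s each)) d).getD x PySem.Set.empty ↔
      y ∈ d.getD x PySem.Set.empty ∨ (x ∈ items ∧ y ∈ each) := by
  induction items generalizing d with
  | nil => simp
  | cons i rest ih =>
    simp only [List.foldl_cons, ih, PySem.Dict.getD_modify, List.mem_cons]
    by_cases hxi : x = i
    · subst hxi
      simp [PySem.Set.mem_update]
      tauto
    · simp [hxi]

theorem pvNeigh_fold_getD (ls : List (List Int)) (d : PySem.Dict Int (PySem.Set Int))
    (x y : Int) :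
    y ∈ (ls.foldl (fun d each =>
          each.foldl (fun d item => d.modify item PySem.Set.empty
            (fun s => PySem.Set.update s each)) d) d).getD x PySem.Set.empty ↔
      y ∈ d.getD x PySem.Set.empty ∨ ∃ l, l ∈ ls ∧ x ∈ l ∧ y ∈ l := by
  induction ls generalizing d with
  | nil => simp
  | cons l rest ih =>
    simp only [List.foldl_cons, ih, pvNeigh_inner_getD, List.mem_cons]
    constructor
    · rintro ((h | h) | ⟨l', hl', hx, hy⟩)
      · exact Or.inl h
      · exact Or.inr ⟨l, Or.inl rfl, h.1, h.2⟩
      · exact Or.inr ⟨l', Or.inr hl', hx, hy⟩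
    · rintro (h | ⟨l', (rfl | hl'), hx, hy⟩)
      · exact Or.inl (Or.inl h)
      · exact Or.inl (Or.inr ⟨hx, hy⟩)
      · exact Or.inr ⟨l', hl', hx, hy⟩

theorem pvNeigh_getD (lists : List (List Int)) (x y : Int) :
    y ∈ (pvNeigh lists).getD x PySem.Set.empty ↔ pvEdge lists x y := by
  unfold pvNeigh pvEdge
  rw [pvNeigh_fold_getD]
  simp [PySem.Dict.getD_empty, PySem.Set.empty]

theorem pvNeigh_fold_keys (ls : List (List Int)) (d : PySem.Dict Int (PySem.Set Int)) :
    (ls.foldl (fun d each =>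
        each.foldl (fun d item => d.modify item PySem.Set.empty
          (fun s => PySem.Set.update s each)) d) d).keys =
      PySem.Set.update d.keys ls.flatten := by
  induction ls generalizing d with
  | nil => simp [PySem.Set.update]
  | cons l rest ih =>
    simp only [List.foldl_cons, List.flatten_cons, PySem.Set.update_append]
    rw [ih, PySem.Dict.keys_foldl_modify (f := fun _ _ => fun s => PySem.Set.update s l)]

theorem pvNeigh_keys (lists : List (List Int)) :
    (pvNeigh lists).keys = PySem.Set.ofList lists.flatten := by
  unfold pvNeigh
  rw [pvNeigh_fold_keys]
  simp [PySem.Dict.keys_empty, PySem.Set.update_nil_left]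

-- ---------- port A: the BFS worklist loop computes a component ----------

theorem pvBfs (lists : List (List Int)) (P : Int → Prop)
    (hP : ∀ x y, P x → pvEdge lists x y → P y) :
    ∀ (fuel : Nat) (nodes visited acc : List Int),
    lists.flatten.length + 1 ≤ fuel + visited.length →
    (∀ x ∈ nodes, x ∈ lists.flatten) →
    (∀ x ∈ visited, x ∈ lists.flatten) →
    nodes.Nodup → visited.Nodup →
    (∀ x ∈ nodes, x ∉ visited) →
    (∀ x ∈ acc, P x) → (∀ x ∈ nodes, P x) →
    (∀ x ∈ acc, ∀ y, pvEdge lists x y → y ∈ visited ∨ y ∈ nodes) →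
    (∀ y ∈ visited, P y → y ∈ acc) →
    ∃ t : List Int,
      pvCompLoop (pvNeigh lists) fuel nodes visited acc = (acc ++ t, visited ++ t) ∧
      (∀ x ∈ acc ++ t, P x) ∧
      (∀ x ∈ acc ++ t, ∀ y, pvEdge lists x y → y ∈ visited ++ t) ∧
      (∀ y ∈ visited ++ t, P y → y ∈ acc ++ t) ∧
      (visited ++ t).Nodup ∧
      (∀ y ∈ visited ++ t, y ∈ lists.flatten) ∧
      (∀ x ∈ nodes, x ∈ visited ++ t) := by
  intro fuel
  induction fuel with
  | zero =>
    intro nodes visited acc hfuel _ hvD _ hvN _ _ _ _ _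
    have := pvNodup_subset_length hvN hvD
    omega
  | succ fuel ih =>
    intro nodes visited acc hfuel hnD hvD hnN hvN hdisj haccP hnP hcompl hPvis
    rcases nodes with _ | ⟨node, rest⟩
    · refine ⟨[], by simp [pvCompLoop], by simpa using haccP, ?_, by simpa using hPvis,
        by simpa using hvN, by simpa using hvD, by simp⟩
      intro x hx y hy
      simp only [List.append_nil] at hx ⊢
      rcases hcompl x hx y hy with h | h
      · exact h
      · simp at h
    · have hnodev : node ∉ visited := hdisj node (by simp)
      have hadd : PySem.Set.add visited node = visited ++ [node] :=
        PySem.Set.add_of_not_mem hnodev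
      have hrestN : rest.Nodup := (List.nodup_cons.mp hnN).2
      have hnode_rest : node ∉ rest := (List.nodup_cons.mp hnN).1
      have hnodeD : node ∈ lists.flatten := hnD node (by simp)
      have hPnode : P node := hnP node (by simp)
      have hmem_nodes1 : ∀ x,
          x ∈ PySem.Set.union rest
            (PySem.Set.diff ((pvNeigh lists).getD node PySem.Set.empty) (visited ++ [node])) ↔
          x ∈ rest ∨ (pvEdge lists node x ∧ ¬(x ∈ visited ∨ x = node)) := by
        intro x
        rw [PySem.Set.mem_union, PySem.Set.mem_diff, pvNeigh_getD]
        simp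
      obtain ⟨t, heq, hC2, hC3, hC4, hC5, hC6, hC7⟩ :=
        ih (PySem.Set.union rest
              (PySem.Set.diff ((pvNeigh lists).getD node PySem.Set.empty) (visited ++ [node])))
           (visited ++ [node]) (acc ++ [node])
          (by simp only [List.length_append, List.length_cons, List.length_nil]; omega)
          (by intro x hx
              rcases (hmem_nodes1 x).mp hx with h | ⟨he, _⟩
              · exact hnD x (by simp [h])
              · exact pvEdge_mem_flatten he)
          (by intro x hx
              rcases List.mem_append.mp hx with h | h
              · exact hvD x h
              · simp at h; subst h; exact hnodeD)
          (PySem.Set.nodup_union _ _ hrestN)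
          (List.Nodup.append hvN (List.nodup_singleton _)
            (by intro a ha hb; simp at hb; subst hb; exact hnodev ha))
          (by intro x hx
              rcases (hmem_nodes1 x).mp hx with h | ⟨_, hnv⟩
              · intro hc
                rcases List.mem_append.mp hc with h' | h'
                · exact hdisj x (by simp [h]) h'
                · simp at h'; subst h'; exact hnode_rest h
              · intro hc
                rcases List.mem_append.mp hc with h' | h'
                · exact hnv (Or.inl h')
                · simp at h'; exact hnv (Or.inr h'))
          (by intro x hx
              rcases List.mem_append.mp hx with h | h
              · exact haccP x h
              · simp at h; subst h; exact hPnode)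
          (by intro x hx
              rcases (hmem_nodes1 x).mp hx with h | ⟨he, _⟩
              · exact hnP x (by simp [h])
              · exact hP node x hPnode he)
          (by intro x hx y hy
              rcases List.mem_append.mp hx with h | h
              · rcases hcompl x h y hy with h' | h'
                · exact Or.inl (List.mem_append.mpr (Or.inl h'))
                · rcases List.mem_cons.mp h' with rfl | h''
                  · exact Or.inl (List.mem_append.mpr (Or.inr (by simp)))
                  · exact Or.inr ((hmem_nodes1 y).mpr (Or.inl h''))
              · simp at h; subst h
                by_cases hyv : y ∈ visited ∨ y = x
                · rcases hyv with h' | h'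
                  · exact Or.inl (List.mem_append.mpr (Or.inl h'))
                  · exact Or.inl (List.mem_append.mpr (Or.inr (by simp [h'])))
                · exact Or.inr ((hmem_nodes1 y).mpr (Or.inr ⟨hy, hyv⟩)))
          (by intro y hy hPy
              rcases List.mem_append.mp hy with h | h
              · exact List.mem_append.mpr (Or.inl (hPvis y h hPy))
              · simp at h; subst h; exact List.mem_append.mpr (Or.inr (by simp)))
      refine ⟨node :: t, ?_, ?_, ?_, ?_, ?_, ?_, ?_⟩
      · show pvCompLoop (pvNeigh lists) (fuel + 1) (node :: rest) visited acc = _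
        rw [pvCompLoop]
        simp only [hadd]
        rw [heq]
        simp
      · intro x hx
        apply hC2
        rcases List.mem_append.mp hx with h | h
        · exact List.mem_append.mpr (Or.inl (List.mem_append.mpr (Or.inl h)))
        · rcases List.mem_cons.mp h with rfl | h'
          · exact List.mem_append.mpr (Or.inl (by simp))
          · exact List.mem_append.mpr (Or.inr h')
      · intro x hx y hy
        have hm : y ∈ (visited ++ [node]) ++ t := by
          apply hC3 x _ y hy
          rcases List.mem_append.mp hx with h | h
          · exact List.mem_append.mpr (Or.inl (List.mem_append.mpr (Or.inl h)))
          · rcases List.mem_cons.mp h with rfl | h'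
            · exact List.mem_append.mpr (Or.inl (by simp))
            · exact List.mem_append.mpr (Or.inr h')
        simpa using hm
      · intro y hy hPy
        have hm : y ∈ (visited ++ [node]) ++ t := by simpa using hy
        have := hC4 y hm hPy
        rcases List.mem_append.mp this with h | h
        · rcases List.mem_append.mp h with h' | h'
          · exact List.mem_append.mpr (Or.inl h')
          · simp at h'; subst h'; simp
        · simp [h]
      · have := hC5; simpa using this
      · intro y hy
        apply hC6
        simpa using hy
      · intro x hx
        have hnodein : node ∈ (visited ++ [node]) ++ t :=
          List.mem_append.mpr (Or.inl (by simp))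
        rcases List.mem_cons.mp hx with rfl | h
        · simpa using hnodein
        · by_cases hxv : x ∈ visited ++ [node]
          · have : x ∈ (visited ++ [node]) ++ t := List.mem_append.mpr (Or.inl hxv)
            simpa using this
          · have : x ∈ (visited ++ [node]) ++ t := hC7 x ((hmem_nodes1 x).mpr (Or.inl h))
            simpa using this

-- specialisation: running the worklist from a single fresh node yields exactly its component
theorem pvBfs_comp (lists : List (List Int)) (k : Int) (visited : List Int)
    (hk : k ∈ lists.flatten) (hvN : visited.Nodup)
    (hvD : ∀ x ∈ visited, x ∈ lists.flatten)
    (hvC : ∀ x ∈ visited, ∀ y, pvEdge lists x y → y ∈ visited)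
    (hkv : k ∉ visited) :
    ∃ t : List Int,
      pvCompLoop (pvNeigh lists) (lists.flatten.length + 1) [k] visited [] =
        (t, visited ++ t) ∧
      t.Nodup ∧ (∀ y, y ∈ t ↔ pvConn lists k y) ∧ (∀ y ∈ t, y ∈ lists.flatten) := by
  obtain ⟨t, heq, hC2, hC3, hC4, hC5, hC6, hC7⟩ :=
    pvBfs lists (pvConn lists k) (fun x y hx he => pvConn_tail lists hx he)
      (lists.flatten.length + 1) [k] visited []
      (by omega)
      (by intro x hx; simp at hx; subst hx; exact hk)
      hvD (List.nodup_singleton _) hvN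
      (by intro x hx; simp at hx; subst hx; exact hkv)
      (by simp)
      (by intro x hx; simp at hx; subst hx; exact Relation.ReflTransGen.refl)
      (by simp)
      (by intro y hy hPy
          exfalso
          exact hkv (pvClosed_conn hvC y hy k (pvConn_symm lists hPy)))
  simp only [List.nil_append] at heq hC2 hC3 hC4
  refine ⟨t, heq, (List.nodup_append.mp hC5).2.1, ?_, ?_⟩
  · intro y
    constructor
    · exact hC2 y
    · intro hc
      induction hc with
      | refl => exact hC4 k (hC7 k (by simp)) Relation.ReflTransGen.refl
      | @tail m y' hxy e ih =>
        exact hC4 y' (hC3 m ih y' e) (pvConn_tail lists hxy e)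
  · intro y hy
    exact hC6 y (List.mem_append.mpr (Or.inr hy))

-- ---------- port B: one saturation pass ----------

-- the fold of pvPass over an arbitrary tail of sublists
def pvPassAux (ls : List (List Int)) (st : PySem.Set Int × Bool) : PySem.Set Int × Bool :=
  ls.foldl
    (fun (st : PySem.Set Int × Bool) l =>
      if PySem.Set.inter st.1 l ≠ [] ∧ PySem.Set.issuperset st.1 l = false then
        (PySem.Set.update st.1 l, true)
      else st)
    st

theorem pvPass_eq_aux (lists : List (List Int)) (comp : PySem.Set Int) :
    pvPass lists comp = pvPassAux lists (comp, false) := rfl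

theorem pvPassAux_cons (l : List Int) (ls : List (List Int)) (st : PySem.Set Int × Bool) :
    pvPassAux (l :: ls) st =
      pvPassAux ls
        (if PySem.Set.inter st.1 l ≠ [] ∧ PySem.Set.issuperset st.1 l = false then
          (PySem.Set.update st.1 l, true)
        else st) := rfl

theorem pvPassAux_prefix (ls : List (List Int)) :
    ∀ st : PySem.Set Int × Bool, ∃ t, (pvPassAux ls st).1 = st.1 ++ t := by
  induction ls with
  | nil => exact fun st => ⟨[], by simp [pvPassAux]⟩
  | cons l rest ih =>
    intro st
    rw [pvPassAux_cons]
    split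
    · obtain ⟨t, ht⟩ := ih (PySem.Set.update st.1 l, true)
      refine ⟨List.filter (fun y => !PySem.Set.contains st.1 y) (PySem.Set.ofList l) ++ t, ?_⟩
      rw [ht, PySem.Set.update_eq_append_filter]
      simp
    · exact ih st

theorem pvPassAux_sticky (ls : List (List Int)) :
    ∀ s : PySem.Set Int, (pvPassAux ls (s, true)).2 = true := by
  induction ls with
  | nil => intro s; rfl
  | cons l rest ih =>
    intro s
    rw [pvPassAux_cons]
    split
    · exact ih _
    · exact ih s

theorem pvPassAux_false (ls : List (List Int)) :
    ∀ s : PySem.Set Int, (pvPassAux ls (s, false)).2 = false →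
      pvPassAux ls (s, false) = (s, false) ∧
      ∀ l ∈ ls, (∀ z ∈ s, z ∉ l) ∨ (∀ y ∈ l, y ∈ s) := by
  induction ls with
  | nil => intro s _; exact ⟨rfl, by simp⟩
  | cons l rest ih =>
    intro s hf
    rw [pvPassAux_cons] at hf ⊢
    by_cases hcond : PySem.Set.inter s l ≠ [] ∧ PySem.Set.issuperset s l = false
    · rw [if_pos hcond] at hf
      rw [pvPassAux_sticky] at hf
      exact absurd hf (by simp)
    · rw [if_neg hcond] at hf ⊢
      obtain ⟨h1, h2⟩ := ih s hf
      refine ⟨h1, ?_⟩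
      intro l' hl'
      rcases List.mem_cons.mp hl' with rfl | h
      · push_neg at hcond
        by_cases hi : PySem.Set.inter s l' = []
        · left
          intro z hz hzl
          have : z ∈ PySem.Set.inter s l' := (PySem.Set.mem_inter _ _ _).mpr ⟨hz, hzl⟩
          rw [hi] at this
          simp at this
        · right
          have := hcond hi
          exact (PySem.Set.issuperset_iff _ _).mp (by
            cases hss : PySem.Set.issuperset s l'
            · exact absurd hss this
            · rfl)
      · exact h2 l' h

theorem pvPassAux_true_grows (ls : List (List Int)) :
    ∀ s : PySem.Set Int, (pvPassAux ls (s, false)).2 = true →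
      s.length < (pvPassAux ls (s, false)).1.length := by
  induction ls with
  | nil => intro s h; simp [pvPassAux] at h
  | cons l rest ih =>
    intro s h
    rw [pvPassAux_cons] at h ⊢
    by_cases hcond : PySem.Set.inter s l ≠ [] ∧ PySem.Set.issuperset s l = false
    · rw [if_pos hcond]
      obtain ⟨t, ht⟩ := pvPassAux_prefix rest (PySem.Set.update s l, true)
      rw [ht]
      have hgrow : s.length < (PySem.Set.update s l).length := by
        obtain ⟨y, hyl, hys⟩ : ∃ y ∈ l, y ∉ s := by
          by_contra hall
          push_neg at hall
          exact absurd ((PySem.Set.issuperset_iff s l).mpr hall) (by simp [hcond.2])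
        rw [PySem.Set.update_eq_append_filter]
        have hymem : y ∈ List.filter (fun z => !s.contains z) (PySem.Set.ofList l) := by
          rw [List.mem_filter]
          refine ⟨(PySem.Set.mem_ofList _ _).mpr hyl, ?_⟩
          simp only [Bool.not_eq_eq_eq_not, Bool.not_true]
          cases hc : PySem.Set.contains s y
          · rfl
          · exact absurd ((PySem.Set.contains_iff s y).mp hc) hys
        have : 0 < (List.filter (fun z => !s.contains z) (PySem.Set.ofList l)).length :=
          List.length_pos_of_mem hymem
        simp only [List.length_append]
        omega
      simp only [List.length_append]
      omega
    · rw [if_neg hcond] at h ⊢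
      exact ih s h

theorem pvPassAux_sound (lists : List (List Int)) (P : Int → Prop)
    (hP : ∀ x y, P x → pvEdge lists x y → P y) (ls : List (List Int)) :
    (∀ l ∈ ls, l ∈ lists) →
    ∀ st : PySem.Set Int × Bool, (∀ x ∈ st.1, P x) →
      ∀ y ∈ (pvPassAux ls st).1, P y := by
  induction ls with
  | nil => intro _ st h; exact h
  | cons l rest ih =>
    intro hls st hst
    rw [pvPassAux_cons]
    have hrest : ∀ l' ∈ rest, l' ∈ lists := fun l' h => hls l' (by simp [h])
    split
    · rename_i hcond
      apply ih hrest
      intro x hx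
      rcases (PySem.Set.mem_update _ _ _).mp hx with h | h
      · exact hst x h
      · obtain ⟨z, hz⟩ := List.exists_mem_of_ne_nil _ hcond.1
        obtain ⟨hzs, hzl⟩ := (PySem.Set.mem_inter _ _ _).mp hz
        exact hP z x (hst z hzs) ⟨l, hls l (by simp), hzl, h⟩
    · exact ih hrest st hst

theorem pvPassAux_dom (lists : List (List Int)) (ls : List (List Int)) :
    (∀ l ∈ ls, l ∈ lists) →
    ∀ st : PySem.Set Int × Bool, (∀ x ∈ st.1, x ∈ lists.flatten) →
      ∀ y ∈ (pvPassAux ls st).1, y ∈ lists.flatten := by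
  induction ls with
  | nil => intro _ st h; exact h
  | cons l rest ih =>
    intro hls st hst
    rw [pvPassAux_cons]
    have hrest : ∀ l' ∈ rest, l' ∈ lists := fun l' h => hls l' (by simp [h])
    split
    · apply ih hrest
      intro x hx
      rcases (PySem.Set.mem_update _ _ _).mp hx with h | h
      · exact hst x h
      · exact List.mem_flatten.mpr ⟨l, hls l (by simp), h⟩
    · exact ih hrest st hst

theorem pvPassAux_nodup (ls : List (List Int)) :
    ∀ st : PySem.Set Int × Bool, st.1.Nodup → (pvPassAux ls st).1.Nodup := by
  induction ls with
  | nil => intro st h; exact h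
  | cons l rest ih =>
    intro st hst
    rw [pvPassAux_cons]
    split
    · exact ih _ (PySem.Set.nodup_update _ _ hst)
    · exact ih st hst

-- ---------- port B: saturation reaches the component ----------

theorem pvSaturate_prefix (lists : List (List Int)) :
    ∀ (fuel : Nat) (S : PySem.Set Int), ∃ t, pvSaturate lists fuel S = S ++ t := by
  intro fuel
  induction fuel with
  | zero => exact fun S => ⟨[], by simp [pvSaturate]⟩
  | succ fuel ih =>
    intro S
    rw [pvSaturate]
    split
    · obtain ⟨t1, ht1⟩ := pvPassAux_prefix lists (S, false)
      obtain ⟨t2, ht2⟩ := ih (pvPass lists S).1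
      rw [ht2, pvPass_eq_aux, ht1]
      exact ⟨t1 ++ t2, by simp⟩
    · obtain ⟨t1, ht1⟩ := pvPassAux_prefix lists (S, false)
      rw [pvPass_eq_aux, ht1]
      exact ⟨t1, rfl⟩

theorem pvSat (lists : List (List Int)) (P : Int → Prop)
    (hP : ∀ x y, P x → pvEdge lists x y → P y) :
    ∀ (fuel : Nat) (S : PySem.Set Int), S.Nodup →
    (∀ x ∈ S, x ∈ lists.flatten) →
    lists.flatten.length + 1 ≤ fuel + S.length →
    (∀ x ∈ S, P x) →
    (∃ t, pvSaturate lists fuel S = S ++ t) ∧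
    (pvSaturate lists fuel S).Nodup ∧
    (∀ y ∈ pvSaturate lists fuel S, y ∈ lists.flatten) ∧
    (∀ y ∈ pvSaturate lists fuel S, P y) ∧
    (∀ l ∈ lists, (∃ z ∈ pvSaturate lists fuel S, z ∈ l) →
      ∀ y ∈ l, y ∈ pvSaturate lists fuel S) := by
  intro fuel
  induction fuel with
  | zero =>
    intro S hN hD hfuel _
    have := pvNodup_subset_length hN hD
    omega
  | succ fuel ih =>
    intro S hN hD hfuel hSP
    rw [pvSaturate]
    cases hch : (pvPass lists S).2
    · simp only [Bool.false_eq_true, if_false]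
      rw [pvPass_eq_aux] at hch ⊢
      obtain ⟨h1, h2⟩ := pvPassAux_false lists S hch
      rw [h1]
      refine ⟨⟨[], by simp⟩, hN, hD, hSP, ?_⟩
      intro l hl hz y hy
      rcases h2 l hl with h | h
      · obtain ⟨z, hzS, hzl⟩ := hz
        exact absurd hzl (h z hzS)
      · exact h y hy
    · simp only [if_true]
      have hgrow : S.length < (pvPass lists S).1.length := by
        rw [pvPass_eq_aux] at hch ⊢
        exact pvPassAux_true_grows lists S hch
      have hN1 : (pvPass lists S).1.Nodup := by
        rw [pvPass_eq_aux]; exact pvPassAux_nodup lists (S, false) hN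
      have hD1 : ∀ x ∈ (pvPass lists S).1, x ∈ lists.flatten := by
        rw [pvPass_eq_aux]; exact pvPassAux_dom lists lists (fun _ h => h) (S, false) hD
      have hP1 : ∀ x ∈ (pvPass lists S).1, P x := by
        rw [pvPass_eq_aux]; exact pvPassAux_sound lists P hP lists (fun _ h => h) (S, false) hSP
      obtain ⟨⟨t2, ht2⟩, hb, hc, hd, he⟩ := ih (pvPass lists S).1 hN1 hD1 (by omega) hP1
      refine ⟨?_, hb, hc, hd, he⟩
      obtain ⟨t1, ht1⟩ := pvPassAux_prefix lists (S, false)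
      rw [pvPass_eq_aux] at ht2
      rw [pvPass_eq_aux, ht2, ht1]
      exact ⟨t1 ++ t2, by simp⟩

theorem pvSat_comp (lists : List (List Int)) (k : Int) (hk : k ∈ lists.flatten) :
    (pvSaturate lists (lists.flatten.length + 1) (PySem.Set.ofList [k])).Nodup ∧
    (∀ y, y ∈ pvSaturate lists (lists.flatten.length + 1) (PySem.Set.ofList [k]) ↔
      pvConn lists k y) ∧
    (∀ y ∈ pvSaturate lists (lists.flatten.length + 1) (PySem.Set.ofList [k]),
      y ∈ lists.flatten) := by
  have hsingle : PySem.Set.ofList [k] = [k] := rfl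
  obtain ⟨⟨t, ht⟩, hb, hc, hd, he⟩ :=
    pvSat lists (pvConn lists k) (fun x y hx he => pvConn_tail lists hx he)
      (lists.flatten.length + 1) (PySem.Set.ofList [k])
      (by rw [hsingle]; exact List.nodup_singleton _)
      (by rw [hsingle]; intro x hx; simp at hx; subst hx; exact hk)
      (by rw [hsingle]; simp)
      (by rw [hsingle]; intro x hx; simp at hx; subst hx; exact Relation.ReflTransGen.refl)
  refine ⟨hb, ?_, hc⟩
  intro y
  constructor
  · exact hd y
  · intro hconn
    induction hconn with
    | refl => rw [ht, hsingle]; simp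
    | @tail m y' hxy e ih =>
      obtain ⟨l, hl, hml, hyl⟩ := e
      exact he l hl ⟨m, ih, hml⟩ y' hyl

-- ---------- the outer loops ----------

def pvStepA (lists : List (List Int)) (st : List (List Int) × PySem.Set Int) (node : Int) :
    List (List Int) × PySem.Set Int :=
  if PySem.Set.contains st.2 node then st
  else
    let r := pvCompLoop (pvNeigh lists) (lists.flatten.length + 1)
      (PySem.Set.ofList [node]) st.2 []
    (st.1 ++ [PySem.List.sorted r.1 (fun x => x) false], r.2)

def pvStepB (lists : List (List Int)) (st : List (List Int) × PySem.Set Int) (k : Int) :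
    List (List Int) × PySem.Set Int :=
  if PySem.Set.contains st.2 k then st
  else
    let comp := pvSaturate lists (lists.flatten.length + 1) (PySem.Set.ofList [k])
    (st.1 ++ [PySem.List.sorted comp (fun x => x) false], PySem.Set.union st.2 comp)

theorem merge_common_eq_foldA (lists : List (List Int)) :
    merge_common lists =
      ((pvNeigh lists).keys.foldl (pvStepA lists) ([], PySem.Set.empty)).1 := rfl

theorem merge_common_alt_eq_foldB (lists : List (List Int)) :
    merge_common_alt lists =
      (lists.flatten.foldl (pvStepB lists) ([], PySem.Set.empty)).1 := by
  unfold merge_common_alt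
  rw [List.foldl_flatten]
  rfl

-- the invariant coupling the two outer loops
def pvR (lists : List (List Int)) (stA stB : List (List Int) × PySem.Set Int) : Prop :=
  stA.1 = stB.1 ∧ stA.2.Nodup ∧ stB.2.Nodup ∧
  (∀ y, y ∈ stA.2 ↔ y ∈ stB.2) ∧
  (∀ y ∈ stA.2, y ∈ lists.flatten) ∧
  (∀ x ∈ stA.2, ∀ y, pvEdge lists x y → y ∈ stA.2)

theorem pvStep_rel (lists : List (List Int)) (x : Int) (hx : x ∈ lists.flatten)
    (stA stB : List (List Int) × PySem.Set Int) (hR : pvR lists stA stB) :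
    pvR lists (pvStepA lists stA x) (pvStepB lists stB x) := by
  obtain ⟨hout, hAN, hBN, hmem, hdom, hclosed⟩ := hR
  by_cases hxm : x ∈ stA.2
  · have hcA : PySem.Set.contains stA.2 x = true := (PySem.Set.contains_iff _ _).mpr hxm
    have hcB : PySem.Set.contains stB.2 x = true :=
      (PySem.Set.contains_iff _ _).mpr ((hmem x).mp hxm)
    unfold pvStepA pvStepB
    rw [hcA, hcB]
    simp only [if_true]
    exact ⟨hout, hAN, hBN, hmem, hdom, hclosed⟩
  · have hxmB : x ∉ stB.2 := fun h => hxm ((hmem x).mpr h)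
    have hcA : PySem.Set.contains stA.2 x = false := by
      cases hc : PySem.Set.contains stA.2 x
      · rfl
      · exact absurd ((PySem.Set.contains_iff _ _).mp hc) hxm
    have hcB : PySem.Set.contains stB.2 x = false := by
      cases hc : PySem.Set.contains stB.2 x
      · rfl
      · exact absurd ((PySem.Set.contains_iff _ _).mp hc) hxmB
    obtain ⟨t, heq, htN, htmem, htdom⟩ := pvBfs_comp lists x stA.2 hx hAN hdom hclosed hxm
    obtain ⟨hcN, hcmem, hcdom⟩ := pvSat_comp lists x hx
    have hts : PySem.Set.ofList [x] = [x] := rfl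
    have hperm : t.Perm (pvSaturate lists (lists.flatten.length + 1) (PySem.Set.ofList [x])) := by
      rw [List.perm_ext_iff_of_nodup htN hcN]
      intro a
      rw [htmem a, hcmem a]
    have hnotv : ∀ y ∈ t, y ∉ stA.2 := by
      intro y hy hyv
      exact hxm (pvClosed_conn hclosed y hyv x (pvConn_symm lists ((htmem y).mp hy)))
    unfold pvStepA pvStepB
    rw [hcA, hcB]
    simp only [if_false, Bool.false_eq_true]
    rw [hts] at hcN hcmem hcdom hperm ⊢
    rw [heq]
    refine ⟨?_, ?_, ?_, ?_, ?_, ?_⟩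
    · simp only [hout]
      congr 2
      exact (PySem.List.sorted_id_eq_sorted_id_iff_perm _ _).mpr hperm
    · exact List.Nodup.append hAN htN (fun a ha hb => hnotv a hb ha)
    · exact PySem.Set.nodup_union _ _ hBN
    · intro y
      rw [List.mem_append, PySem.Set.mem_union, hmem y, hcmem y, htmem y]
    · intro y hy
      rcases List.mem_append.mp hy with h | h
      · exact hdom y h
      · exact htdom y h
    · intro a ha y hy
      rcases List.mem_append.mp ha with h | h
      · exact List.mem_append.mpr (Or.inl (hclosed a h y hy))
      · refine List.mem_append.mpr (Or.inr ?_)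
        rw [htmem]
        exact pvConn_tail lists ((htmem a).mp h) hy

theorem pvFold_rel (lists : List (List Int)) (ks : List Int)
    (hks : ∀ x ∈ ks, x ∈ lists.flatten) :
    ∀ (stA stB : List (List Int) × PySem.Set Int), pvR lists stA stB →
      pvR lists (ks.foldl (pvStepA lists) stA) (ks.foldl (pvStepB lists) stB) := by
  induction ks with
  | nil => intro stA stB h; exact h
  | cons k rest ih =>
    intro stA stB h
    exact ih (fun x hx => hks x (by simp [hx]))
      _ _ (pvStep_rel lists k (hks k (by simp)) stA stB h)

-- ---------- skipping duplicates: B's fold over flatten = fold over its set ----------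

theorem pvStepB_skip (lists : List (List Int)) (st : List (List Int) × PySem.Set Int)
    (x : Int) (hx : x ∈ st.2) : pvStepB lists st x = st := by
  unfold pvStepB
  rw [(PySem.Set.contains_iff _ _).mpr hx]
  simp

theorem pvStepB_mem_vis (lists : List (List Int)) (st : List (List Int) × PySem.Set Int)
    (x : Int) : x ∈ (pvStepB lists st x).2 := by
  unfold pvStepB
  by_cases hx : x ∈ st.2
  · rw [(PySem.Set.contains_iff _ _).mpr hx]; simpa using hx
  · have hc : PySem.Set.contains st.2 x = false := by
      cases hc : PySem.Set.contains st.2 x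
      · rfl
      · exact absurd ((PySem.Set.contains_iff _ _).mp hc) hx
    rw [hc]
    simp only [Bool.false_eq_true, if_false]
    rw [PySem.Set.mem_union]
    obtain ⟨t, ht⟩ := pvSaturate_prefix lists (lists.flatten.length + 1) (PySem.Set.ofList [x])
    right
    rw [ht]
    simp [PySem.Set.ofList]

theorem pvStepB_vis_mono (lists : List (List Int)) (st : List (List Int) × PySem.Set Int)
    (x y : Int) (hy : y ∈ st.2) : y ∈ (pvStepB lists st x).2 := by
  unfold pvStepB
  split
  · exact hy
  · rw [PySem.Set.mem_union]
    exact Or.inl hy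

theorem pvFoldB_vis_mono (lists : List (List Int)) (xs : List Int) :
    ∀ (st : List (List Int) × PySem.Set Int) (y : Int), y ∈ st.2 →
      y ∈ (xs.foldl (pvStepB lists) st).2 := by
  induction xs with
  | nil => intro st y hy; exact hy
  | cons x rest ih =>
    intro st y hy
    exact ih _ y (pvStepB_vis_mono lists st x y hy)

theorem pvFoldB_mem (lists : List (List Int)) (xs : List Int) :
    ∀ (st : List (List Int) × PySem.Set Int) (x : Int), x ∈ xs →
      x ∈ (xs.foldl (pvStepB lists) st).2 := by
  induction xs with
  | nil => intro st x hx; simp at hx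
  | cons y rest ih =>
    intro st x hx
    rcases List.mem_cons.mp hx with rfl | h
    · exact pvFoldB_vis_mono lists rest _ x (pvStepB_mem_vis lists st x)
    · exact ih _ x h

theorem pvFoldB_dedup (lists : List (List Int)) (xs : List Int) :
    ∀ st : List (List Int) × PySem.Set Int,
      xs.foldl (pvStepB lists) st = (PySem.Set.ofList xs).foldl (pvStepB lists) st := by
  induction xs using List.reverseRecOn with
  | nil => intro st; rfl
  | append_singleton xs x ih =>
    intro st
    rw [PySem.Set.ofList_append_singleton, List.foldl_append]
    by_cases hx : x ∈ xs
    · have hx' : x ∈ PySem.Set.ofList xs := (PySem.Set.mem_ofList _ _).mpr hx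
      rw [PySem.Set.add_of_mem hx', ← ih st]
      simp only [List.foldl_cons, List.foldl_nil]
      exact pvStepB_skip lists _ x (pvFoldB_mem lists xs st x hx)
    · have hx' : x ∉ PySem.Set.ofList xs := fun h => hx ((PySem.Set.mem_ofList _ _).mp h)
      rw [PySem.Set.add_of_not_mem hx', List.foldl_append, ← ih st]

-- ===== VERDICT (by name: the statement is the Claim_ definition above) =====
theorem merge_common_spec : Claim_equal_merge_common := by
  intro lists _
  unfold Spec_merge_common
  rw [merge_common_eq_foldA, merge_common_alt_eq_foldB, pvFoldB_dedup, pvNeigh_keys]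
  exact (pvFold_rel lists (PySem.Set.ofList lists.flatten)
    (fun x hx => (PySem.Set.mem_ofList _ _).mp hx)
    ([], PySem.Set.empty) ([], PySem.Set.empty)
    ⟨rfl, List.nodup_nil, List.nodup_nil, fun y => Iff.rfl,
      fun y hy => by simp [PySem.Set.empty] at hy,
      fun x hx => by simp [PySem.Set.empty] at hx⟩).1
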